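-- pv_equiv track=rewrite | github.com/huid857/wanzheng- | advanced_shoe_analyzer.py | _count_double_alternation_pairs
-- ===== SOURCE A (Python) =====
-- def _count_double_alternation_pairs(data):
--     """
--     统计双跳对数（BBPP 格式的完整"对"数）。
--     Bug#12修复：单独统计 BBPP 结构，不与单跳混淆。
--
--     一个"对"= 连续 2 个相同结果构成一组，相邻两组不同。
--
--     Returns:
--         完整的双跳对数
--     """
--     if len(data) < 4:
--         return 0
--
--     pairs_found = 0
--     i = 0
--     while i < len(data) - 1:
--         # 找到一个"对"：data[i] == data[i+1]
--         if data[i] == data[i + 1]: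
--             pair_val = data[i]
--             i += 2
--             # 下一个"对"要与当前对不同
--             if i < len(data) - 1 and data[i] == data[i + 1] and data[i] != pair_val:
--                 pairs_found += 1
--                 # 不 advance i：让下一对从这里开始
--             # else: 不是 BBPP，跳过这一"对"继续找
--         else:
--             i += 1
--
--     return pairs_found
-- ===== SOURCE B (Python) =====
-- def _count_double_alternation_pairs(data):
--     # Build the list of greedy-detected pairs (start index, value), then
--     # count adjacent entries that are contiguous (start diff 2) with different values.
--     n = len(data)
--     pairs = []
--     i = 0
--     while i < n - 1:
--         if data[i] == data[i + 1]:
--             pairs.append((i, data[i]))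
--             i += 2
--         else:
--             i += 1
--     return sum(1 for (s1, v1), (s2, v2) in zip(pairs, pairs[1:])
--                if s2 == s1 + 2 and v2 != v1)
-- ===== Notes on version B (the rewrite author's own statement) =====
-- stated objective: alternative
-- what changed: Replaces the fused peek-ahead while-loop with two phases: one greedy scan that materialises the list of (start,value) pairs, then a zip over consecutive pairs counting contiguous (start diff 2) value changes; the redundant len<4 guard disappears.
import Mathlib
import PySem

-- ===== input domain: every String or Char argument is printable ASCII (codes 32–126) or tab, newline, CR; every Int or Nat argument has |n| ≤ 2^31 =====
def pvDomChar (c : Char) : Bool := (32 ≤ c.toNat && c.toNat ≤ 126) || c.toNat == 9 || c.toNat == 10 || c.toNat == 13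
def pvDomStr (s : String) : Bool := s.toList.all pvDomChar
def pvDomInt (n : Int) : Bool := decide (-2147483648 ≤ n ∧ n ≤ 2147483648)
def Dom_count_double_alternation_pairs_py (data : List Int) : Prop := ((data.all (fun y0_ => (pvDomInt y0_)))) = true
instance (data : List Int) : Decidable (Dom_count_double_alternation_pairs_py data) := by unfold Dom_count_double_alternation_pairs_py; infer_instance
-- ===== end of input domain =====

-- B replaces A's fused peek-ahead loop by building the pair table first, then counting
-- contiguous value-changing transitions; same values everywhere (objective: alternative).

-- ===== PORT A =====
-- the while loop of A, state (i, pairs_found); branches in A's order.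
-- fuel = an upper bound on the remaining iterations, only to make the loop total
-- (called with fuel = data.length, which always suffices; i advances every iteration).
def pvALoop (data : List Int) : Nat → Nat → Int → Int
  | 0, _, acc => acc
  | fuel + 1, i, acc =>
    if i < data.length - 1 then
      if data.getD i 0 = data.getD (i + 1) 0 then
        -- pair found: pair_val = data[i]; advance i by 2; count if the next pair differs
        pvALoop data fuel (i + 2)
          (if i + 2 < data.length - 1 ∧ data.getD (i + 2) 0 = data.getD (i + 2 + 1) 0 ∧
              data.getD (i + 2) 0 ≠ data.getD i 0 then acc + 1 else acc)
      else
        pvALoop data fuel (i + 1) acc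
    else acc

def count_double_alternation_pairs_py (data : List Int) : Int :=
  if data.length < 4 then 0 else pvALoop data data.length 0 0

-- ===== PORT B =====
-- first pass of B: the greedy scan producing the (start index, value) pair list
-- (fuel as above; called with fuel = data.length, which always suffices)
def pvScanPairs (data : List Int) : Nat → Nat → List (Nat × Int)
  | 0, _ => []
  | fuel + 1, i =>
    if i < data.length - 1 then
      if data.getD i 0 = data.getD (i + 1) 0 then
        (i, data.getD i 0) :: pvScanPairs data fuel (i + 2)
      else
        pvScanPairs data fuel (i + 1)
    else []

-- second pass of B: count over consecutive entries (the zip(pairs, pairs[1:]) sum)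
def pvCountAdj : List (Nat × Int) → Int
  | (s1, v1) :: (s2, v2) :: rest =>
      (if s2 = s1 + 2 ∧ v2 ≠ v1 then 1 else 0) + pvCountAdj ((s2, v2) :: rest)
  | _ => 0

def count_double_alternation_pairs_py_alt (data : List Int) : Int :=
  pvCountAdj (pvScanPairs data data.length 0)

-- ===== PRECONDITION & SPEC =====
def Spec_count_double_alternation_pairs_py (data : List Int) (out : Int) : Prop := out = count_double_alternation_pairs_py_alt data
instance (data : List Int) (out : Int) : Decidable (Spec_count_double_alternation_pairs_py data out) := by unfold Spec_count_double_alternation_pairs_py; infer_instance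

-- ===== CLAIM (what is proved, stated in full; the proofs are below) =====
def Claim_equal_count_double_alternation_pairs_py : Prop := ∀ (data : List Int), Dom_count_double_alternation_pairs_py data → Spec_count_double_alternation_pairs_py data (count_double_alternation_pairs_py data)

-- ===== LEMMAS AND PROOFS =====

-- heads of the scan list start at or after the scan's start index
theorem pvScan_head_ge (data : List Int) (fuel : Nat) : ∀ (j s : Nat) (v : Int)
    (L : List (Nat × Int)), pvScanPairs data fuel j = (s, v) :: L → j ≤ s := by
  induction fuel with
  | zero => intro j s v L h; exact absurd h (by simp [pvScanPairs])
  | succ fuel ih =>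
      intro j s v L h
      rw [pvScanPairs] at h
      by_cases hj : j < data.length - 1
      · rw [if_pos hj] at h
        by_cases heq : data.getD j 0 = data.getD (j + 1) 0
        · rw [if_pos heq] at h
          injection h with h1 _
          injection h1 with h1 _
          omega
        · rw [if_neg heq] at h
          have := ih (j + 1) s v L h
          omega
      · rw [if_neg hj] at h
        exact absurd h (by simp)

-- the contribution of the head of the scan starting at j, as A's peek-ahead condition
theorem pvScan_head_cond (data : List Int) (fuel j : Nat) (v : Int)
    (hf : data.length - j ≤ fuel) :
    (match pvScanPairs data fuel j with
      | (s2, v2) :: _ => if s2 = j ∧ v2 ≠ v then (1 : Int) else 0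
      | [] => 0)
    = (if j < data.length - 1 ∧ data.getD j 0 = data.getD (j + 1) 0 ∧
          data.getD j 0 ≠ v then (1 : Int) else 0) := by
  cases fuel with
  | zero =>
      have : ¬ (j < data.length - 1) := by omega
      rw [if_neg (fun hc => this hc.1)]
      rfl
  | succ fuel =>
      rw [pvScanPairs]
      by_cases hj : j < data.length - 1
      · rw [if_pos hj]
        by_cases heq : data.getD j 0 = data.getD (j + 1) 0
        · rw [if_pos heq]
          show (if j = j ∧ data.getD j 0 ≠ v then (1 : Int) else 0) = _
          by_cases hne : data.getD j 0 ≠ v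
          · rw [if_pos ⟨rfl, hne⟩, if_pos ⟨hj, heq, hne⟩]
          · rw [if_neg (fun hc => hne hc.2),
                if_neg (fun hc : _ ∧ _ ∧ _ => hne hc.2.2)]
        · rw [if_neg heq, if_neg (fun hc : _ ∧ _ ∧ _ => heq hc.2.1)]
          cases h : pvScanPairs data fuel (j + 1) with
          | nil => rfl
          | cons p L =>
              obtain ⟨s2, v2⟩ := p
              have := pvScan_head_ge data fuel (j + 1) s2 v2 L h
              have hne : ¬ (s2 = j ∧ v2 ≠ v) := by omega
              simp only [hne, if_false]
      · rw [if_neg hj, if_neg (fun hc => hj hc.1)]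

-- A's loop equals acc plus B's count over the scan from the same index and fuel
theorem pvALoop_eq (data : List Int) (fuel : Nat) : ∀ (i : Nat) (acc : Int),
    data.length - i ≤ fuel →
    pvALoop data fuel i acc = acc + pvCountAdj (pvScanPairs data fuel i) := by
  induction fuel with
  | zero =>
      intro i acc _
      simp [pvALoop, pvScanPairs, pvCountAdj]
  | succ fuel ih =>
      intro i acc hf
      rw [pvALoop, pvScanPairs]
      by_cases hi : i < data.length - 1
      · rw [if_pos hi, if_pos hi]
        by_cases heq : data.getD i 0 = data.getD (i + 1) 0
        · rw [if_pos heq, if_pos heq]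
          rw [ih (i + 2) _ (by omega)]
          have hcond := pvScan_head_cond data fuel (i + 2) (data.getD i 0) (by omega)
          cases h : pvScanPairs data fuel (i + 2) with
          | nil =>
              rw [h] at hcond
              simp only [pvCountAdj]
              simp only at hcond
              omega
          | cons p L =>
              obtain ⟨s2, v2⟩ := p
              rw [h] at hcond
              simp only [pvCountAdj]
              simp only at hcond
              omega
        · rw [if_neg heq, if_neg heq]
          exact ih (i + 1) acc (by omega)
      · rw [if_neg hi, if_neg hi]
        simp [pvCountAdj]

-- two pairs need at least their four slots: 2·|scan j| ≤ len − j
theorem pvScan_len_le (data : List Int) (fuel : Nat) : ∀ (j : Nat),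
    2 * (pvScanPairs data fuel j).length ≤ data.length - j := by
  induction fuel with
  | zero => intro j; simp [pvScanPairs]
  | succ fuel ih =>
      intro j
      rw [pvScanPairs]
      by_cases hj : j < data.length - 1
      · rw [if_pos hj]
        by_cases heq : data.getD j 0 = data.getD (j + 1) 0
        · rw [if_pos heq]
          simp only [List.length_cons]
          have := ih (j + 2)
          omega
        · rw [if_neg heq]
          have := ih (j + 1)
          omega
      · rw [if_neg hj]
        simp

theorem pvCountAdj_short (L : List (Nat × Int)) (h : L.length ≤ 1) : pvCountAdj L = 0 := by
  match L, h with
  | [], _ => rfl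
  | [p], _ => rfl

-- ===== VERDICT (by name: the statement is the Claim_ definition above) =====
theorem count_double_alternation_pairs_py_spec : Claim_equal_count_double_alternation_pairs_py := by
  intro data _
  unfold Spec_count_double_alternation_pairs_py
  unfold count_double_alternation_pairs_py count_double_alternation_pairs_py_alt
  by_cases h : data.length < 4
  · rw [if_pos h]
    have := pvScan_len_le data data.length 0
    rw [pvCountAdj_short _ (by omega)]
  · rw [if_neg h, pvALoop_eq data data.length 0 0 (by omega)]
    omega
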